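-- pv_equiv track=rewrite | github.com/coderodent-calfee/PyQuiz | NumberSequences.py | is_strictly_increasing_array_removing_one_element
-- ===== SOURCE A (Python) =====
-- def is_strictly_increasing_array_removing_one_element(array):
--     removed_index = -1
--     failed = False
--     N = len(array)
--     if N < 2:
--         return not failed
--
--     for i in range(2, N):
--         a = array[i-2]
--         b = array[i-1]
--         c = array[i]
--
--         if  i-2 <= removed_index <= i:
--             a = array[i-3]
--             if removed_index == i-1:
--                 b = array[i-2]
--             if removed_index == i:
--                 c = array[i-1]
--
--         if a < b < c:   # 1, 2, 3
--             continue
--         if a >= b >= c: # 3, 2, 1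
--             failed = True
--             break
--         if a < b >= c: # 1, 3, 2 or 2, 3, 1
--             if removed_index != -1:
--                 failed = True
--                 break
--             removed_index = i-1
--         if a >= b < c: # 2, 1, 3 or 3, 1, 2
--             if removed_index != -1:
--                 failed = True
--                 break
--             removed_index = i-2
--     return not failed, removed_index
-- ===== SOURCE B (Python) =====
-- def is_strictly_increasing_array_removing_one_element(array):
--     # Find the first violating triple, then decide with closed checks on the tail
--     # (A's convention: a peak removes index i-1, a valley removes i-2).
--     N = len(array)
--     if N < 2:
--         return True
--     i0 = next((i for i in range(2, N) if not (array[i - 2] < array[i - 1] < array[i])), N)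
--     if i0 == N:
--         return True, -1
--     a, b, c = array[i0 - 2], array[i0 - 1], array[i0]
--     tail_ok = all(array[j - 1] < array[j] for j in range(i0 + 1, N))
--     if a >= b >= c:
--         return False, -1
--     if a < b:  # peak: drop array[i0-1]
--         return (i0 + 1 >= N or a < c) and tail_ok, i0 - 1
--     # valley: drop array[i0-2]
--     return tail_ok, i0 - 2
-- ===== Notes on version B (the rewrite author's own statement) =====
-- stated objective: alternative
-- what changed: Instead of A's single stateful scan that simulates the removal by patching each triple with a removed_index interval check, B first finds the first violating triple, classifies it once (peak/valley/double-descent), and decides the result with closed checks (one boundary comparison plus a strictly-increasing check of the tail).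
-- outside the precondition, e.g. on is_strictly_increasing_array_removing_one_element([5]): A returns True, B returns True
import Mathlib
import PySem

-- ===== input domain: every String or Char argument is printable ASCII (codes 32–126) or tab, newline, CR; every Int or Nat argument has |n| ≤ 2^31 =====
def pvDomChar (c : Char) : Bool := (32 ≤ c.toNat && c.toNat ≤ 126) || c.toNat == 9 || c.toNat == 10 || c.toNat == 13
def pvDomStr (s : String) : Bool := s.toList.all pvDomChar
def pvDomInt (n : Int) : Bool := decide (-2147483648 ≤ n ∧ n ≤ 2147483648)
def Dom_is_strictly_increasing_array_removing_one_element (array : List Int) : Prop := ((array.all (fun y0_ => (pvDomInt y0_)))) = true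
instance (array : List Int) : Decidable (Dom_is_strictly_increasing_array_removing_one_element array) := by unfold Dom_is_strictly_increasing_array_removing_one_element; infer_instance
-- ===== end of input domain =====

-- B replaces A's stateful patched-triple scan by find-first-violation + closed tail checks (alternative decomposition, same cost); A returns a bare bool (no tuple) for len < 2, excluded by Pre_.


-- ===== PORT A =====
-- array[k]; at every call site reached from either entry point the index is in range
-- (0 ≤ k < len, as the proofs below establish), so the .getD 0 default is never consulted there.
def pvAt (array : List Int) (k : Int) : Int := (PySem.List.pyGet? array k).getD 0

-- A's for-loop over i in range(2, N) with state (removed_index, failed); `break` is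
-- modelled by returning the final (not failed, removed_index) pair directly.
def pvALoop (array : List Int) (i removed : Int) : Bool × Int :=
  if _h : i < (array.length : Int) then
    let a0 := pvAt array (i-2)
    let b0 := pvAt array (i-1)
    let c0 := pvAt array i
    let a := if i-2 ≤ removed ∧ removed ≤ i then pvAt array (i-3) else a0
    let b := if (i-2 ≤ removed ∧ removed ≤ i) ∧ removed = i-1 then pvAt array (i-2) else b0
    let c := if (i-2 ≤ removed ∧ removed ≤ i) ∧ removed = i then pvAt array (i-1) else c0
    if a < b ∧ b < c then pvALoop array (i+1) removed
    else if a ≥ b ∧ b ≥ c then (false, removed)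
    else if a < b ∧ b ≥ c then
      (if removed ≠ -1 then (false, removed) else pvALoop array (i+1) (i-1))
    else
      (if removed ≠ -1 then (false, removed) else pvALoop array (i+1) (i-2))
  else (true, removed)
termination_by ((array.length : Int) - i).toNat
decreasing_by all_goals omega

-- For N < 2 the Python returns a bare bool, not a tuple; that case is outside Pre_ below.
def is_strictly_increasing_array_removing_one_element (array : List Int) : Bool × Int :=
  if (array.length : Int) < 2 then (true, -1)
  else pvALoop array 2 (-1)

-- ===== PORT B =====
-- first i in [start, N) whose triple (array[i-2], array[i-1], array[i]) is not strictly increasing, else N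
def pvFirstViol (array : List Int) (i : Int) : Int :=
  if _h : i < (array.length : Int) then
    if pvAt array (i-2) < pvAt array (i-1) ∧ pvAt array (i-1) < pvAt array i
    then pvFirstViol array (i+1) else i
  else (array.length : Int)
termination_by ((array.length : Int) - i).toNat
decreasing_by all_goals omega

-- all(array[j-1] < array[j] for j in range(j0, N))
def pvPairsInc (array : List Int) (j : Int) : Bool :=
  if _h : j < (array.length : Int) then
    decide (pvAt array (j-1) < pvAt array j) && pvPairsInc array (j+1)
  else true
termination_by ((array.length : Int) - j).toNat
decreasing_by all_goals omega

def is_strictly_increasing_array_removing_one_element_alt (array : List Int) : Bool × Int :=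
  if (array.length : Int) < 2 then (true, -1)
  else
    let N := (array.length : Int)
    let i0 := pvFirstViol array 2
    if i0 = N then (true, -1)
    else
      let a := pvAt array (i0-2)
      let b := pvAt array (i0-1)
      let c := pvAt array i0
      let tail_ok := pvPairsInc array (i0+1)
      if a ≥ b ∧ b ≥ c then (false, -1)
      else if a < b then ((decide (N ≤ i0+1) || decide (a < c)) && tail_ok, i0 - 1)
      else (tail_ok, i0 - 2)

-- ===== PRECONDITION & SPEC =====
-- Pre_ excludes arrays of length < 2, on which A returns a bare bool (True)
-- instead of a value of the declared (bool, int) tuple type.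
def Pre_is_strictly_increasing_array_removing_one_element (array : List Int) : Prop :=
  2 ≤ array.length
instance (array : List Int) : Decidable (Pre_is_strictly_increasing_array_removing_one_element array) := by
  unfold Pre_is_strictly_increasing_array_removing_one_element; infer_instance

def pvWitness_is_strictly_increasing_array_removing_one_element : List Int := [3, 1, 2]

def Spec_is_strictly_increasing_array_removing_one_element (array : List Int) (out : Bool × Int) : Prop := out = is_strictly_increasing_array_removing_one_element_alt array
instance (array : List Int) (out : Bool × Int) : Decidable (Spec_is_strictly_increasing_array_removing_one_element array out) := by unfold Spec_is_strictly_increasing_array_removing_one_element; infer_instance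

-- ===== CLAIM (what is proved, stated in full; the proofs are below) =====
def Claim_equal_is_strictly_increasing_array_removing_one_element : Prop := ∀ (array : List Int), Dom_is_strictly_increasing_array_removing_one_element array → Pre_is_strictly_increasing_array_removing_one_element array → Spec_is_strictly_increasing_array_removing_one_element array (is_strictly_increasing_array_removing_one_element array)

-- ===== LEMMAS AND PROOFS =====

-- proof-only: the body of B after the first violation i0 has been located
def pvPhase2 (array : List Int) (i0 : Int) : Bool × Int :=
  if i0 = (array.length : Int) then (true, -1)
  else
    if pvAt array (i0-2) ≥ pvAt array (i0-1) ∧ pvAt array (i0-1) ≥ pvAt array i0 then (false, -1)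
    else if pvAt array (i0-2) < pvAt array (i0-1) then
      ((decide ((array.length : Int) ≤ i0+1) || decide (pvAt array (i0-2) < pvAt array i0)) && pvPairsInc array (i0+1), i0 - 1)
    else (pvPairsInc array (i0+1), i0 - 2)

-- once removed_index is at least 3 left of the cursor, A's loop just checks that the
-- remaining pairs increase (the patching interval can never fire again)
lemma pvTail (array : List Int) : ∀ (k : Nat) (j r : Int),
    ((array.length : Int) - j).toNat ≤ k → 0 ≤ r → r ≤ j - 3 →
    pvAt array (j-2) < pvAt array (j-1) →
    pvALoop array j r = (pvPairsInc array j, r) := by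
  intro k
  induction k with
  | zero =>
    intro j r hk hr0 hr3 hseed
    have hjL : ¬ j < (array.length:Int) := by omega
    rw [pvALoop, pvPairsInc]
    simp [hjL]
  | succ k ih =>
    intro j r hk hr0 hr3 hseed
    rw [pvALoop, pvPairsInc]
    by_cases hjL : j < (array.length:Int)
    · have hno : ¬ (j-2 ≤ r ∧ r ≤ j) := by omega
      have hne : r ≠ -1 := by omega
      simp only [hjL, dif_pos, if_neg hno, if_neg (by omega : ¬ ((j-2 ≤ r ∧ r ≤ j) ∧ r = j-1)), if_neg (by omega : ¬ ((j-2 ≤ r ∧ r ≤ j) ∧ r = j))]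
      by_cases hbc : pvAt array (j-1) < pvAt array j
      · rw [if_pos ⟨hseed, hbc⟩]
        rw [ih (j+1) r (by omega) hr0 (by omega) (by rw [show (j:Int)+1-2 = j-1 by ring, show (j:Int)+1-1 = j by ring]; exact hbc)]
        simp [hbc]
      · rw [if_neg (by tauto)]
        rw [if_neg (by omega), if_pos ⟨hseed, by omega⟩, if_pos hne]
        simp [hbc]
    · simp [hjL]

-- one step after a peak removal (removed_index = i-1): A patches the triple once, then pvTail applies
lemma pvPeak (array : List Int) (i : Int) (h2 : 2 ≤ i) (hL : i < (array.length : Int)) :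
    pvALoop array (i+1) (i-1) =
      ((decide ((array.length : Int) ≤ i+1) || decide (pvAt array (i-2) < pvAt array i)) && pvPairsInc array (i+1), i - 1) := by
  rw [pvALoop]
  by_cases hjL : i+1 < (array.length:Int)
  · have hne : (i:Int)-1 ≠ -1 := by omega
    have hnotle : ¬ ((array.length:Int) ≤ i+1) := by omega
    simp only [hjL, dif_pos, if_pos (show (i:Int)+1-2 ≤ i-1 ∧ i-1 ≤ i+1 by omega),
      if_neg (show ¬ (((i:Int)+1-2 ≤ i-1 ∧ i-1 ≤ i+1) ∧ i-1 = i+1-1) by omega),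
      if_neg (show ¬ (((i:Int)+1-2 ≤ i-1 ∧ i-1 ≤ i+1) ∧ i-1 = i+1) by omega)]
    rw [show (i:Int)+1-3 = i-2 by ring, show (i:Int)+1-1 = i by ring]
    rw [pvPairsInc]
    simp only [hjL, dif_pos]
    rw [show (i:Int)+1-1 = i by ring, show (i:Int)+1+1 = i+2 by ring]
    by_cases hab : pvAt array (i-2) < pvAt array i
    · by_cases hbc : pvAt array i < pvAt array (i+1)
      · rw [if_pos ⟨hab, hbc⟩]
        rw [pvTail array ((array.length:Int) - (i+2)).toNat (i+2) (i-1) (by omega) (by omega) (by omega)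
          (by rw [show (i:Int)+2-2 = i by ring, show (i:Int)+2-1 = i+1 by ring]; exact hbc)]
        simp [hab, hbc]
      · rw [if_neg (by tauto), if_neg (by omega), if_pos ⟨hab, by omega⟩, if_pos hne]
        simp [hbc]
    · by_cases hbc : pvAt array i < pvAt array (i+1)
      · rw [if_neg (by tauto), if_neg (by omega), if_neg (by tauto), if_pos hne]
        simp [hab, hnotle]
      · rw [if_neg (by tauto), if_pos ⟨by omega, by omega⟩]
        simp [hab, hnotle]
  · rw [dif_neg hjL, pvPairsInc, dif_neg hjL]
    simp [show (array.length:Int) ≤ i+1 by omega]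

-- while removed_index = -1, A's scan agrees with B's find-first-violation decomposition
lemma pvScan (array : List Int) : ∀ (k : Nat) (i : Int),
    ((array.length : Int) - i).toNat ≤ k → 2 ≤ i →
    pvALoop array i (-1) = pvPhase2 array (pvFirstViol array i) := by
  intro k
  induction k with
  | zero =>
    intro i hk h2
    have hjL : ¬ i < (array.length:Int) := by omega
    rw [pvALoop, pvFirstViol, pvPhase2]
    simp [hjL]
  | succ k ih =>
    intro i hk h2
    rw [pvALoop, pvFirstViol]
    by_cases hjL : i < (array.length:Int)
    · simp only [hjL, dif_pos,
        if_neg (show ¬ ((i:Int)-2 ≤ -1 ∧ (-1:Int) ≤ i) by omega),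
        if_neg (show ¬ (((i:Int)-2 ≤ -1 ∧ (-1:Int) ≤ i) ∧ (-1:Int) = i-1) by omega),
        if_neg (show ¬ (((i:Int)-2 ≤ -1 ∧ (-1:Int) ≤ i) ∧ (-1:Int) = i) by omega)]
      by_cases habc : pvAt array (i-2) < pvAt array (i-1) ∧ pvAt array (i-1) < pvAt array i
      · rw [if_pos habc, if_pos habc]
        exact ih (i+1) (by omega) (by omega)
      · rw [if_neg habc, if_neg habc, pvPhase2, if_neg (show i ≠ (array.length:Int) by omega)]
        by_cases h1 : pvAt array (i-2) ≥ pvAt array (i-1) ∧ pvAt array (i-1) ≥ pvAt array i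
        · rw [if_pos h1, if_pos h1]
        · rw [if_neg h1, if_neg h1]
          by_cases hab : pvAt array (i-2) < pvAt array (i-1)
          · have hbc : pvAt array (i-1) ≥ pvAt array i := by
              by_contra hc; exact habc ⟨hab, by omega⟩
            rw [if_pos ⟨hab, hbc⟩, if_neg (show ¬ ((-1:Int) ≠ -1) by simp), if_pos hab]
            exact pvPeak array i h2 hjL
          · have hbc : pvAt array (i-1) < pvAt array i := by
              by_contra hc; exact h1 ⟨by omega, by omega⟩
            rw [if_neg (fun h => hab h.1), if_neg (show ¬ ((-1:Int) ≠ -1) by simp), if_neg hab]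
            exact pvTail array ((array.length:Int) - (i+1)).toNat (i+1) (i-2) (by omega) (by omega) (by omega)
              (by rw [show (i:Int)+1-2 = i-1 by ring, show (i:Int)+1-1 = i by ring]; exact hbc)
    · rw [pvPhase2]
      simp [hjL]

-- ===== VERDICT (by name: the statement is the Claim_ definition above) =====
theorem is_strictly_increasing_array_removing_one_element_spec : Claim_equal_is_strictly_increasing_array_removing_one_element := by
  intro array _ hpre
  unfold Spec_is_strictly_increasing_array_removing_one_element
  unfold is_strictly_increasing_array_removing_one_element is_strictly_increasing_array_removing_one_element_alt
  have h : ¬ ((array.length:Int) < 2) := by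
    have : 2 ≤ array.length := hpre
    omega
  rw [if_neg h, if_neg h, pvScan array ((array.length:Int)-2).toNat 2 (by omega) (by omega), pvPhase2]
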